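-- pv_equiv track=rewrite | github.com/Computational-Energy/plexos-coad | coad/solution.py | compress_interval_py
-- ===== SOURCE A (Python) =====
-- def compress_interval_py(interval_data):
--     """Python fallback for data compression of interval data
--     """
--     row = interval_data.pop(0)
--     final_data = [[row[0], 1, row[1], row[2]]]
--     last_value = row[2]
--     last_intid = row[1]
--     for row in interval_data:
--         if row[2] != last_value:
--             final_data[-1][2] = last_intid
--             last_value = row[2]
--             final_data.append([row[0], row[1], row[1], last_value])
--         last_intid = row[1]
--     final_data[-1][2] = last_intid
--     return final_data
-- ===== SOURCE B (Python) =====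
-- # Alternative decomposition: split rows into maximal runs of equal value with an
-- # outer per-run loop and inner scan, emitting one compressed row per run, instead
-- # of A's single pass that patches the last emitted row in place.
-- # Like A, this pops the first element of interval_data (same observable mutation).
-- def compress_interval_py(interval_data):
--     """Python fallback for data compression of interval data
--     """
--     head_row = interval_data.pop(0)
--     rows = [head_row] + interval_data
--     n = len(rows)
--     out = []
--     first = True
--     s = 0
--     while s < n:
--         head = rows[s]
--         i = s + 1
--         while i < n and rows[i][2] == head[2]:
--             i += 1
--         out.append([head[0], 1 if first else head[1], rows[i - 1][1], head[2]])
--         s = i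
--         first = False
--     return out
-- ===== Notes on version B (the rewrite author's own statement) =====
-- stated objective: alternative
-- what changed: B splits the rows into maximal runs of equal value with an outer per-run loop and an inner scan, emitting each compressed row once, instead of A's single pass that patches the previously emitted row in place via last_value/last_intid accumulators.
import Mathlib
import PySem

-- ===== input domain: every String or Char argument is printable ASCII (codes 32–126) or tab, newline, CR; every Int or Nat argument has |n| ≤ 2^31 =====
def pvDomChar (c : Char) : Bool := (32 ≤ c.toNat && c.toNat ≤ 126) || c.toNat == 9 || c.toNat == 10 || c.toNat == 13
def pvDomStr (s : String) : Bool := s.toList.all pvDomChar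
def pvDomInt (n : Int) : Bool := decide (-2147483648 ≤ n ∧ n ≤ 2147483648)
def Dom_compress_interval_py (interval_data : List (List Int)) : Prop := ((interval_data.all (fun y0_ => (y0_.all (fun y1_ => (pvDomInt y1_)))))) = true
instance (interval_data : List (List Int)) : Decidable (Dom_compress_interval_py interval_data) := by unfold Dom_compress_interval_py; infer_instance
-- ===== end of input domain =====

-- B replaces A's in-place-patching single pass by an outer per-run loop with an inner
-- scan (same cost, different decomposition); like A it pops interval_data's first
-- element in Python (same mutation) — the theorems below are about the return value.

-- ===== PORT A =====
-- row[i] for i = 0,1,2; inside Pre_ every accessed index is in range, so the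
-- .getD 0 default is never the value used (exact there).
def gA (row : List Int) (i : Int) : Int := (PySem.List.pyGet? row i).getD 0

-- the for-loop: final_data kept REVERSED (head = final_data[-1]); set2 models
-- final_data[-1][2] = last_intid
def set2 (row : List Int) (v : Int) : List Int := row.set 2 v

def compressA_go (rows : List (List Int)) (fdRev : List (List Int))
    (last_value last_intid : Int) : List (List Int) :=
  match rows with
  | [] =>
      (match fdRev with
       | [] => []
       | h :: t => set2 h last_intid :: t).reverse
  | row :: rest =>
      if gA row 2 ≠ last_value then
        compressA_go rest
          ([gA row 0, gA row 1, gA row 1, gA row 2] ::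
            (match fdRev with | [] => [] | h :: t => set2 h last_intid :: t))
          (gA row 2) (gA row 1)
      else
        compressA_go rest fdRev last_value (gA row 1)

def compress_interval_py (interval_data : List (List Int)) : List (List Int) :=
  match interval_data with
  | [] => []  -- Python raises IndexError on pop(0); excluded by Pre_
  | row :: rest =>
      compressA_go rest [[gA row 0, 1, gA row 1, gA row 2]] (gA row 2) (gA row 1)

-- ===== PORT B =====
def gB (row : List Int) (i : Int) : Int := (PySem.List.pyGet? row i).getD 0

-- inner while loop: first index ≥ i whose row's value differs from v (or n)
def runEnd (rows : List (List Int)) (n : Nat) (v : Int) (i : Nat) : Nat :=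
  if h : i < n ∧ gB (rows.getD i []) 2 == v then runEnd rows n v (i + 1) else i
termination_by n - i
decreasing_by omega

theorem runEnd_ge (rows : List (List Int)) (n : Nat) (v : Int) (i : Nat) :
    i ≤ runEnd rows n v i := by
  unfold runEnd
  split
  · exact Nat.le_trans (Nat.le_succ i) (runEnd_ge rows n v (i + 1))
  · exact Nat.le_refl i
termination_by n - i
decreasing_by omega

-- outer while loop over run starts s
def compressB_go (rows : List (List Int)) (n s : Nat) (first : Bool) : List (List Int) :=
  if hs : s < n then
    let head := rows.getD s []
    let i := runEnd rows n (gB head 2) (s + 1)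
    [gB head 0, if first then 1 else gB head 1, gB (rows.getD (i - 1) []) 1, gB head 2]
      :: compressB_go rows n i false
  else []
termination_by n - s
decreasing_by have := runEnd_ge rows n (gB (rows.getD s []) 2) (s + 1); omega

def compress_interval_py_alt (interval_data : List (List Int)) : List (List Int) :=
  match interval_data with
  | [] => []  -- Python raises IndexError on pop(0); excluded by Pre_
  | head_row :: rest =>
      let rows := head_row :: rest
      compressB_go rows rows.length 0 true

-- ===== PRECONDITION & SPEC =====
-- Pre_ excludes exactly the inputs on which the Python A raises IndexError
-- (empty list: pop(0); a row with fewer than 3 elements: row[2]); B raises there too.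
def Pre_compress_interval_py (interval_data : List (List Int)) : Prop :=
  interval_data ≠ [] ∧ ∀ row ∈ interval_data, 3 ≤ row.length

instance (interval_data : List (List Int)) : Decidable (Pre_compress_interval_py interval_data) := by
  unfold Pre_compress_interval_py; infer_instance

def pvWitness_compress_interval_py : List (List Int) :=
  [[1, 1, 5], [1, 2, 5], [1, 3, 7], [1, 4, 7], [1, 5, 5]]

def Spec_compress_interval_py (interval_data : List (List Int)) (out : List (List Int)) : Prop := out = compress_interval_py_alt interval_data
instance (interval_data : List (List Int)) (out : List (List Int)) : Decidable (Spec_compress_interval_py interval_data out) := by unfold Spec_compress_interval_py; infer_instance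

-- ===== CLAIM (what is proved, stated in full; the proofs are below) =====
def Claim_equal_compress_interval_py : Prop := ∀ (interval_data : List (List Int)), Dom_compress_interval_py interval_data → Pre_compress_interval_py interval_data → Spec_compress_interval_py interval_data (compress_interval_py interval_data)

-- ===== LEMMAS AND PROOFS =====

-- the two getter helpers coincide
theorem gA_eq_gB : gA = gB := rfl

-- reference form 1: A's loop with the pending entry's components made explicit
def closeB (rows : List (List Int)) (a b v d : Int) : List (List Int) :=
  match rows with
  | [] => [[a, b, d, v]]
  | row :: rest =>
      if gB row 2 ≠ v then
        [a, b, d, v] :: closeB rest (gB row 0) (gB row 1) (gB row 2) (gB row 1)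
      else
        closeB rest a b v (gB row 1)

-- reference form 2: run extraction on a suffix, with takeWhile/dropWhile
def compressS (rows : List (List Int)) (first : Bool) : List (List Int) :=
  match rows with
  | [] => []
  | head :: rest =>
      [gB head 0, if first then 1 else gB head 1,
        ((rest.takeWhile (fun r => gB r 2 == gB head 2)).map (fun r => gB r 1)).getLastD (gB head 1),
        gB head 2]
        :: compressS (rest.dropWhile (fun r => gB r 2 == gB head 2)) false
termination_by rows.length
decreasing_by
  have := rest.length_dropWhile_le (fun r => gB r 2 == gB head 2)
  simp only [List.length_cons]
  omega

theorem compressA_go_eq_closeB (rows : List (List Int)) :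
    ∀ (t : List (List Int)) (a b c v d : Int),
      compressA_go rows ([a, b, c, v] :: t) v d = t.reverse ++ closeB rows a b v d := by
  induction rows with
  | nil =>
      intro t a b c v d
      simp [compressA_go, closeB, set2]
  | cons row rest ih =>
      intro t a b c v d
      by_cases h : gA row 2 ≠ v
      · rw [show compressA_go (row :: rest) ([a, b, c, v] :: t) v d =
            compressA_go rest
              ([gA row 0, gA row 1, gA row 1, gA row 2] :: set2 [a, b, c, v] d :: t)
              (gA row 2) (gA row 1) from by simp [compressA_go, h]]
        rw [show set2 [a, b, c, v] d = [a, b, d, v] from rfl]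
        rw [ih]
        have hb : gB row 2 ≠ v := h
        simp [closeB, hb, gA_eq_gB]
      · rw [show compressA_go (row :: rest) ([a, b, c, v] :: t) v d =
            compressA_go rest ([a, b, c, v] :: t) v (gA row 1) from by
          simp [compressA_go, h]]
        rw [ih]
        have hb : ¬ gB row 2 ≠ v := h
        simp [closeB, hb, gA_eq_gB]

theorem compressS_cons (head : List Int) (rest : List (List Int)) (first : Bool) :
    compressS (head :: rest) first =
      [gB head 0, if first then 1 else gB head 1,
        ((rest.takeWhile (fun r => gB r 2 == gB head 2)).map (fun r => gB r 1)).getLastD (gB head 1),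
        gB head 2]
        :: compressS (rest.dropWhile (fun r => gB r 2 == gB head 2)) false := by
  rw [compressS]

theorem closeB_eq_compressS (rows : List (List Int)) :
    ∀ (a b v d : Int),
      closeB rows a b v d =
        [a, b, ((rows.takeWhile (fun r => gB r 2 == v)).map (fun r => gB r 1)).getLastD d, v]
          :: compressS (rows.dropWhile (fun r => gB r 2 == v)) false := by
  induction rows with
  | nil => intro a b v d; simp [closeB, compressS]
  | cons row rest ih =>
      intro a b v d
      by_cases h : gB row 2 = v
      · have hcond : ¬ gB row 2 ≠ v := by simp [h]
        have hc : ((fun r => gB r 2 == v) row) = true := by simp [h]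
        rw [show closeB (row :: rest) a b v d = closeB rest a b v (gB row 1) from by
          simp [closeB, hcond]]
        rw [ih]
        rw [show List.takeWhile (fun r => gB r 2 == v) (row :: rest) =
            row :: List.takeWhile (fun r => gB r 2 == v) rest from
          List.takeWhile_cons_of_pos hc]
        rw [show List.dropWhile (fun r => gB r 2 == v) (row :: rest) =
            List.dropWhile (fun r => gB r 2 == v) rest from
          List.dropWhile_cons_of_pos hc]
        rw [List.map_cons, List.getLastD_cons]
      · have hc : ¬ ((fun r => gB r 2 == v) row) = true := by simp [h]
        rw [show closeB (row :: rest) a b v d =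
            [a, b, d, v] :: closeB rest (gB row 0) (gB row 1) (gB row 2) (gB row 1) from by
          simp [closeB, h]]
        rw [ih]
        rw [show List.takeWhile (fun r => gB r 2 == v) (row :: rest) = [] from
          List.takeWhile_cons_of_neg hc]
        rw [show List.dropWhile (fun r => gB r 2 == v) (row :: rest) = row :: rest from
          List.dropWhile_cons_of_neg hc]
        rw [compressS_cons]
        simp

theorem runEnd_eq (rows : List (List Int)) (v : Int) (i : Nat) :
    runEnd rows rows.length v i =
      i + ((rows.drop i).takeWhile (fun r => gB r 2 == v)).length := by
  rw [runEnd]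
  split
  case isTrue h =>
    obtain ⟨hi, hv⟩ := h
    have hg : rows.getD i [] = rows[i] := List.getD_eq_getElem rows [] hi
    rw [runEnd_eq rows v (i + 1)]
    rw [List.drop_eq_getElem_cons hi, List.takeWhile_cons]
    rw [hg] at hv
    simp [hv]
    omega
  case isFalse h =>
    by_cases hi : i < rows.length
    · have hg : rows.getD i [] = rows[i] := List.getD_eq_getElem rows [] hi
      have hv : ¬ (gB rows[i] 2 == v) = true := fun hvv => h ⟨hi, hg ▸ hvv⟩
      rw [List.drop_eq_getElem_cons hi, List.takeWhile_cons]
      simp [hv]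
    · have hd : rows.drop i = [] := List.drop_eq_nil_of_le (by omega)
      simp [hd]
termination_by rows.length - i
decreasing_by omega

-- dropWhile as a drop by the takeWhile length
theorem dropWhile_eq_drop_len {α : Type} (p : α → Bool) (l : List α) :
    l.dropWhile p = l.drop (l.takeWhile p).length := by
  induction l with
  | nil => simp
  | cons x xs ih =>
      by_cases h : p x
      · simp [List.dropWhile_cons, List.takeWhile_cons, h, ih]
      · simp [List.dropWhile_cons, List.takeWhile_cons, h]

-- takeWhile entries agree with the list's own entries
theorem takeWhile_getElem {α : Type} (p : α → Bool) (l : List α) (k : Nat)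
    (hk : k < (l.takeWhile p).length) :
    (l.takeWhile p)[k]'hk = l[k]'(Nat.lt_of_lt_of_le hk (l.takeWhile_prefix (p := p)).length_le) :=
  (l.takeWhile_prefix (p := p)).getElem hk

theorem getLastD_map (f : List Int → Int) (l : List (List Int)) (d : List Int) :
    (l.map f).getLastD (f d) = f (l.getLastD d) := by
  rw [List.getLastD_eq_getLast?, List.getLastD_eq_getLast?, List.getLast?_map]
  cases h : l.getLast? with
  | none => simp
  | some x => simp

-- rows[s+1+L-1] is the last row of the run starting after s (or rows[s] if the run is empty)
theorem run_last_getD (rows : List (List Int)) (s : Nat) (hs : s < rows.length)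
    (p : List Int → Bool) :
    rows.getD (s + 1 + ((rows.drop (s + 1)).takeWhile p).length - 1) [] =
      ((rows.drop (s + 1)).takeWhile p).getLastD (rows[s]) := by
  cases hE : (rows.drop (s + 1)).takeWhile p with
  | nil =>
      have : s + 1 + ([] : List (List Int)).length - 1 = s := by simp
      rw [this, List.getD_eq_getElem rows [] hs]
      simp
  | cons r0 rtail =>
      have hpre : ((rows.drop (s + 1)).takeWhile p).length ≤ (rows.drop (s + 1)).length :=
        ((rows.drop (s + 1)).takeWhile_prefix (p := p)).length_le
      have hlen : ((rows.drop (s + 1)).takeWhile p).length = rtail.length + 1 := by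
        rw [hE]; simp
      have hklt : rtail.length < ((rows.drop (s + 1)).takeWhile p).length := by omega
      have hlendrop : (rows.drop (s + 1)).length = rows.length - (s + 1) := by simp
      have hlt2 : s + 1 + rtail.length < rows.length := by omega
      have hkdrop : rtail.length < (rows.drop (s + 1)).length := by omega
      have h1 : rows.getD (s + 1 + ((rows.drop (s + 1)).takeWhile p).length - 1) [] =
          rows[s + 1 + rtail.length]'hlt2 := by
        have : s + 1 + ((rows.drop (s + 1)).takeWhile p).length - 1 = s + 1 + rtail.length := by
          omega
        rw [this, List.getD_eq_getElem rows [] hlt2]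
      have h2 : (rows.drop (s + 1))[rtail.length]'hkdrop = rows[s + 1 + rtail.length]'hlt2 := by
        rw [List.getElem_drop]
      have h3 : ((rows.drop (s + 1)).takeWhile p)[rtail.length]'hklt =
          (rows.drop (s + 1))[rtail.length]'hkdrop :=
        takeWhile_getElem p (rows.drop (s + 1)) rtail.length hklt
      have h4 : ((rows.drop (s + 1)).takeWhile p).getLastD (rows[s]) =
          ((rows.drop (s + 1)).takeWhile p)[rtail.length]'hklt := by
        rw [List.getLastD_eq_getLast?, List.getLast?_eq_getElem?]
        rw [hlen]
        simp [List.getElem?_eq_getElem hklt]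
      have h5 : ((rows.drop (s + 1)).takeWhile p).getLastD (rows[s]) =
          rows[s + 1 + rtail.length]'hlt2 := by rw [h4, h3, h2]
      rw [← hE, h1, h5]

theorem compressB_go_eq_compressS (rows : List (List Int)) :
    ∀ s first, compressB_go rows rows.length s first = compressS (rows.drop s) first := by
  intro s first
  by_cases hs : s < rows.length
  · have hg : rows.getD s [] = rows[s] := List.getD_eq_getElem rows [] hs
    rw [compressB_go]
    simp only [hs, dif_pos, hg]
    rw [runEnd_eq rows (gB rows[s] 2) (s + 1)]
    rw [compressB_go_eq_compressS rows
        (s + 1 + ((rows.drop (s + 1)).takeWhile (fun r => gB r 2 == gB rows[s] 2)).length) false]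
    rw [List.drop_eq_getElem_cons hs, compressS_cons]
    rw [run_last_getD rows s hs (fun r => gB r 2 == gB rows[s] 2)]
    rw [getLastD_map (fun r => gB r 1)
        ((rows.drop (s + 1)).takeWhile (fun r => gB r 2 == gB rows[s] 2)) (rows[s])]
    rw [dropWhile_eq_drop_len, List.drop_drop]
  · have hd : rows.drop s = [] := List.drop_eq_nil_of_le (by omega)
    rw [compressB_go]
    simp [hs, hd, compressS]
termination_by s => rows.length - s
decreasing_by
  have := runEnd_ge rows rows.length (gB (rows[s]) 2) (s + 1)
  omega

theorem A_eq_compressS (l : List (List Int)) :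
    compress_interval_py l = compressS l true := by
  cases l with
  | nil => rw [show compress_interval_py [] = [] from rfl]; rw [compressS]
  | cons row rest =>
      rw [show compress_interval_py (row :: rest) =
          compressA_go rest [[gA row 0, 1, gA row 1, gA row 2]] (gA row 2) (gA row 1) from rfl]
      rw [compressA_go_eq_closeB]
      rw [gA_eq_gB]
      rw [closeB_eq_compressS]
      rw [compressS_cons]
      simp

theorem B_eq_compressS (l : List (List Int)) :
    compress_interval_py_alt l = compressS l true := by
  cases l with
  | nil => rw [show compress_interval_py_alt [] = [] from rfl]; rw [compressS]
  | cons head_row rest =>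
      rw [show compress_interval_py_alt (head_row :: rest) =
          compressB_go (head_row :: rest) (head_row :: rest).length 0 true from rfl]
      rw [compressB_go_eq_compressS, List.drop_zero]

-- ===== VERDICT (by name: the statement is the Claim_ definition above) =====
theorem compress_interval_py_spec : Claim_equal_compress_interval_py := by
  intro l _ _
  unfold Spec_compress_interval_py
  rw [A_eq_compressS, B_eq_compressS]
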